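-- pv_equiv track=rewrite | github.com/entelecheia/ekorpkit | ekorpkit/models/ngram/base.py | _exist_ordered_overlap
-- ===== SOURCE A (Python) =====
-- def _exist_ordered_overlap(list_s, list_l):
--     if len(list_s) > len(list_l):
--         return _exist_ordered_overlap(list_l, list_s)
--     matched_first_item = False
--     for s_i, s in enumerate(list_s):
--         if not list_l:
--             break
--         matched = -1
--         for l_i, l in enumerate(list_l):
--             if s == l:
--                 matched = l_i
--                 if l_i == 0 or s_i == 0:
--                     matched_first_item = True
--                 break
--         list_l = list_l[matched + 1 :]
--     if matched == -1:
--         return False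
--     if not matched_first_item and len(list_l) > 0:
--         return False
--     return True
-- ===== SOURCE B (Python) =====
-- def _exist_ordered_overlap(list_s, list_l):
--     if len(list_s) > len(list_l):
--         list_s, list_l = list_l, list_s
--     # index the long list once: value -> ascending list of positions
--     pos = {}
--     for i, v in enumerate(list_l):
--         pos.setdefault(v, []).append(i)
--     last = len(list_l) - 1
--     prev = -1          # absolute index of the last consumed element of list_l
--     mfi = False        # matched_first_item
--     found = False      # did the most recent item of list_s match
--     for s_i, s in enumerate(list_s):
--         if prev == last:
--             break
--         found = False
--         for idx in pos.get(s, ()):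
--             if idx > prev:
--                 found = True
--                 if idx == prev + 1 or s_i == 0:
--                     mfi = True
--                 prev = idx
--                 break
--     return found and (mfi or prev == last)
-- ===== Notes on version B (the rewrite author's own statement) =====
-- stated objective: faster
-- what changed: Instead of rescanning the whole remaining long list for every item of the short list and re-slicing it, B builds a value-to-positions index of the long list once and, per short-list item, scans only that value's ascending position list for the first position past the last consumed one, tracking a single integer cursor.
import Mathlib
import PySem

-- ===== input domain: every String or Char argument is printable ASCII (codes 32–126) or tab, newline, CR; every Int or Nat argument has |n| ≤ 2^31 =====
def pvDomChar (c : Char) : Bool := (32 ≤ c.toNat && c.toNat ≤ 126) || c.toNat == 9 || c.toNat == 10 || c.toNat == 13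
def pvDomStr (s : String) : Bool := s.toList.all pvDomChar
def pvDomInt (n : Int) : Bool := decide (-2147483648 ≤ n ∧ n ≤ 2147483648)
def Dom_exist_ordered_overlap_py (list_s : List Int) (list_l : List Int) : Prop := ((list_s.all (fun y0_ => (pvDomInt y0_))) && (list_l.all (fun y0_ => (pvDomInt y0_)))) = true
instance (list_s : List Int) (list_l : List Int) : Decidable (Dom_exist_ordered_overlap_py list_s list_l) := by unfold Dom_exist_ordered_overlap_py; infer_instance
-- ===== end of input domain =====

-- B replaces A's rescan-and-reslice of the remaining long list by a value→positions
-- index built once plus an advancing integer cursor; equivalence of return values is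
-- proved on Pre_ (both lists nonempty; A raises NameError when the shorter is empty).

-- ===== PORT A =====
-- inner loop: first relative index of s in the list (enumerate scan), -1 if absent
def pvAFind (s : Int) : List Int → Int → Int
  | [], _ => -1
  | l :: rest, l_i => if s = l then l_i else pvAFind s rest (l_i + 1)

-- outer loop state: (list_l remainder, matched, matched_first_item)
def pvALoop : List Int → Int → List Int → Int → Bool → (List Int × Int × Bool)
  | [], _, ll, matched, mfi => (ll, matched, mfi)
  | s :: rest, s_i, ll, matched, mfi =>
    if ll = [] then (ll, matched, mfi)
    else
      let m := pvAFind s ll 0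
      let mfi' := if m ≠ -1 ∧ (m = 0 ∨ s_i = 0) then true else mfi
      pvALoop rest (s_i + 1) (PySem.List.slice ll (some (m + 1)) none) m mfi'

def exist_ordered_overlap_py (list_s : List Int) (list_l : List Int) : Bool :=
  if h : list_s.length > list_l.length then exist_ordered_overlap_py list_l list_s
  else
    -- Python's `matched` is unassigned before the first iteration; Pre_ guarantees the
    -- first iteration runs and assigns it, so the initial -1 here is never observed.
    let r := pvALoop list_s 0 list_l (-1) false
    if r.2.1 = -1 then false
    else if !r.2.2 && decide (r.1.length > 0) then false
    else true
termination_by list_s.length - list_l.length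
decreasing_by omega

-- ===== PORT B =====
-- pos.setdefault(v, []).append(i) over enumerate(list_l)
def pvBuildPos : List Int → Int → PySem.Dict Int (List Int) → PySem.Dict Int (List Int)
  | [], _, d => d
  | v :: rest, i, d => pvBuildPos rest (i + 1) (d.modify v [] (fun xs => xs ++ [i]))

-- inner loop: first position in pos[s] strictly past the cursor
def pvFirstGt (prev : Int) : List Int → Option Int
  | [] => none
  | idx :: rest => if idx > prev then some idx else pvFirstGt prev rest

-- outer loop state: (prev, mfi, found)
def pvBLoop (pos : PySem.Dict Int (List Int)) (last : Int) :
    List Int → Int → Int → Bool → Bool → (Int × Bool × Bool)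
  | [], _, prev, mfi, found => (prev, mfi, found)
  | s :: rest, s_i, prev, mfi, found =>
    if prev = last then (prev, mfi, found)
    else
      match pvFirstGt prev (pos.getD s []) with
      | none => pvBLoop pos last rest (s_i + 1) prev mfi false
      | some idx =>
          pvBLoop pos last rest (s_i + 1) idx
            (if idx = prev + 1 ∨ s_i = 0 then true else mfi) true

def exist_ordered_overlap_py_alt (list_s : List Int) (list_l : List Int) : Bool :=
  let p := if list_s.length > list_l.length then (list_l, list_s) else (list_s, list_l)
  let pos := pvBuildPos p.2 0 PySem.Dict.empty
  let last : Int := (p.2.length : Int) - 1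
  let r := pvBLoop pos last p.1 0 (-1) false false
  r.2.2 && (r.2.1 || decide (r.1 = last))

-- ===== PRECONDITION & SPEC =====
-- Pre_ excludes exactly the inputs where either list is empty: there Python A raises
-- NameError (`matched` is never assigned before it is read).
def Pre_exist_ordered_overlap_py (list_s : List Int) (list_l : List Int) : Prop :=
  list_s ≠ [] ∧ list_l ≠ []
instance (list_s : List Int) (list_l : List Int) : Decidable (Pre_exist_ordered_overlap_py list_s list_l) := by unfold Pre_exist_ordered_overlap_py; infer_instance

def pvWitness_exist_ordered_overlap_py : List Int × List Int := ([1, 3], [1, 2, 3])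

def Spec_exist_ordered_overlap_py (list_s : List Int) (list_l : List Int) (out : Bool) : Prop := out = exist_ordered_overlap_py_alt list_s list_l
instance (list_s : List Int) (list_l : List Int) (out : Bool) : Decidable (Spec_exist_ordered_overlap_py list_s list_l out) := by unfold Spec_exist_ordered_overlap_py; infer_instance

-- ===== CLAIM (what is proved, stated in full; the proofs are below) =====
def Claim_equal_exist_ordered_overlap_py : Prop := ∀ (list_s : List Int) (list_l : List Int), Dom_exist_ordered_overlap_py list_s list_l → Pre_exist_ordered_overlap_py list_s list_l → Spec_exist_ordered_overlap_py list_s list_l (exist_ordered_overlap_py list_s list_l)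

-- ===== LEMMAS AND PROOFS =====

-- positions (from offset i) at which s occurs
def pvOcc (s : Int) : List Int → Int → List Int
  | [], _ => []
  | v :: rest, i => if v = s then i :: pvOcc s rest (i + 1) else pvOcc s rest (i + 1)

theorem pvBuildPos_getD (s : Int) : ∀ (L : List Int) (i : Int) (d : PySem.Dict Int (List Int)),
    (pvBuildPos L i d).getD s [] = d.getD s [] ++ pvOcc s L i := by
  intro L
  induction L with
  | nil => intro i d; simp [pvBuildPos, pvOcc]
  | cons v rest ih =>
    intro i d
    simp only [pvBuildPos, pvOcc]
    rw [ih, PySem.Dict.getD_modify]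
    by_cases h : v = s
    · subst h; simp
    · simp [h, Ne.symm h]

theorem pvOcc_bounds (s : Int) : ∀ (L : List Int) (i : Int), ∀ x ∈ pvOcc s L i,
    i ≤ x ∧ x < i + L.length := by
  intro L
  induction L with
  | nil => intro i x hx; simp [pvOcc] at hx
  | cons v rest ih =>
    intro i x hx
    simp only [pvOcc] at hx
    split_ifs at hx with h
    · rcases List.mem_cons.mp hx with rfl | hx'
      · simp only [List.length_cons]; push_cast; omega
      · have := ih (i + 1) x hx'
        simp only [List.length_cons]; push_cast at this ⊢; omega
    · have := ih (i + 1) x hx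
      simp only [List.length_cons]; push_cast at this ⊢; omega

theorem pvOcc_append (s : Int) : ∀ (A B : List Int) (i : Int),
    pvOcc s (A ++ B) i = pvOcc s A i ++ pvOcc s B (i + A.length) := by
  intro A B
  induction A with
  | nil => intro i; simp [pvOcc]
  | cons a rest ih =>
    intro i
    simp only [List.cons_append, pvOcc, List.length_cons]
    have harg : i + 1 + (rest.length : Int) = i + ((rest.length : Int) + 1) := by ring
    split_ifs with h
    · rw [ih, harg]; push_cast; rfl
    · rw [ih, harg]; push_cast; rfl

theorem pvOcc_shift (s : Int) : ∀ (L : List Int) (i c : Int),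
    pvOcc s L (i + c) = (pvOcc s L i).map (· + c) := by
  intro L
  induction L with
  | nil => intro i c; simp [pvOcc]
  | cons v rest ih =>
    intro i c
    simp only [pvOcc]
    have harg : i + c + 1 = i + 1 + c := by ring
    split_ifs with h
    · simp [harg, ih]
    · simp [harg, ih]

theorem pvFirstGt_append (prev : Int) : ∀ (X Y : List Int), (∀ x ∈ X, x ≤ prev) →
    pvFirstGt prev (X ++ Y) = pvFirstGt prev Y := by
  intro X Y
  induction X with
  | nil => intro _; simp
  | cons x xs ih =>
    intro h
    have hx : ¬ x > prev := by
      have := h x (List.mem_cons_self)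
      omega
    simp only [List.cons_append, pvFirstGt, if_neg hx]
    exact ih fun y hy => h y (List.mem_cons_of_mem _ hy)

theorem pvFirstGt_head (prev : Int) (s : Int) : ∀ (L : List Int) (i : Int), prev < i →
    pvFirstGt prev (pvOcc s L i) = (pvOcc s L i).head? := by
  intro L
  induction L with
  | nil => intro i _; simp [pvOcc, pvFirstGt]
  | cons v rest ih =>
    intro i hi
    simp only [pvOcc]
    split_ifs with h
    · simp [pvFirstGt, show i > prev from hi]
    · exact ih (i + 1) (by omega)

theorem pvAFind_occ (s : Int) : ∀ (L : List Int) (j : Int),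
    pvAFind s L j = ((pvOcc s L j).head?).getD (-1) := by
  intro L
  induction L with
  | nil => intro j; simp [pvAFind, pvOcc]
  | cons l rest ih =>
    intro j
    simp only [pvAFind, pvOcc]
    by_cases h : s = l
    · simp [h]
    · have h' : ¬ (l = s) := fun e => h e.symm
      simp [h, h', ih]

-- per-iteration bridge: searching pos[s] past the cursor = searching the remainder
theorem pvStep (s : Int) (L : List Int) (p : Nat) (hp : p ≤ L.length) :
    pvFirstGt ((p : Int) - 1) (pvOcc s L 0)
      = ((pvOcc s (L.drop p) 0).head?).map (· + (p : Int)) := by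
  have hto : ((L.take p).length : Int) = (p : Int) := by
    simp [List.length_take]; omega
  conv_lhs => rw [← List.take_append_drop p L]
  rw [pvOcc_append, hto]
  rw [pvFirstGt_append _ _ _ (by
    intro x hx
    have hb := pvOcc_bounds s (L.take p) 0 x hx
    omega)]
  rw [pvFirstGt_head _ s _ _ (by omega)]
  rw [show (0 : Int) + (p : Int) = 0 + (p : Int) from rfl, pvOcc_shift]
  simp

theorem pvLoop_agree (L : List Int) : ∀ (S : List Int) (s_i : Int) (p : Nat)
    (mfi : Bool) (m : Int) (f : Bool), p ≤ L.length → f = decide (m ≠ -1) →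
    ∃ p' : Nat, p' ≤ L.length ∧
      (pvALoop S s_i (L.drop p) m mfi).1 = L.drop p' ∧
      (pvBLoop (pvBuildPos L 0 PySem.Dict.empty) ((L.length : Int) - 1) S s_i ((p : Int) - 1) mfi f).1 = (p' : Int) - 1 ∧
      (pvALoop S s_i (L.drop p) m mfi).2.2 = (pvBLoop (pvBuildPos L 0 PySem.Dict.empty) ((L.length : Int) - 1) S s_i ((p : Int) - 1) mfi f).2.1 ∧
      (pvBLoop (pvBuildPos L 0 PySem.Dict.empty) ((L.length : Int) - 1) S s_i ((p : Int) - 1) mfi f).2.2 = decide ((pvALoop S s_i (L.drop p) m mfi).2.1 ≠ -1) := by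
  have hpos : ∀ t : Int, (pvBuildPos L 0 PySem.Dict.empty).getD t [] = pvOcc t L 0 := by
    intro t; rw [pvBuildPos_getD]; simp [PySem.Dict.getD_empty]
  intro S
  induction S with
  | nil =>
    intro s_i p mfi m f hp hf
    exact ⟨p, hp, rfl, rfl, rfl, by simp [pvALoop, pvBLoop, hf]⟩
  | cons s rest ih =>
    intro s_i p mfi m f hp hf
    by_cases hbreak : L.drop p = []
    · have hpL : p = L.length := by
        have := List.drop_eq_nil_iff.mp hbreak; omega
      have hbB : ((p : Int) - 1) = (L.length : Int) - 1 := by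
        rw [hpL]
      refine ⟨p, hp, ?_, ?_, ?_, ?_⟩ <;>
        simp [pvALoop, pvBLoop, hbreak, hbB, hf]
    · have hlt : p < L.length := by
        rcases Nat.lt_or_ge p L.length with h | h
        · exact h
        · exact absurd (List.drop_eq_nil_iff.mpr h) hbreak
      have hbB : ¬ ((p : Int) - 1 = (L.length : Int) - 1) := by
        intro h; omega
      have hstep := pvStep s L p hp
      have hfind := pvAFind_occ s (L.drop p) 0
      cases hh : (pvOcc s (L.drop p) 0).head? with
      | none =>
        have hm0 : pvAFind s (L.drop p) 0 = -1 := by rw [hfind, hh]; rfl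
        have hfg : pvFirstGt ((p : Int) - 1) (pvOcc s L 0) = none := by
          rw [hstep, hh]; rfl
        have hslice : PySem.List.slice (L.drop p) (some ((-1 : Int) + 1)) none = L.drop p := by
          rw [PySem.List.slice_from _ (by omega)]
          rfl
        simp only [pvALoop, pvBLoop, if_neg hbreak, if_neg hbB, hpos, hfg, hslice, hm0]
        have hmfi : (if (-1 : Int) ≠ -1 ∧ ((-1 : Int) = 0 ∨ s_i = 0) then true else mfi) = mfi := by
          simp
        rw [hmfi]
        exact ih (s_i + 1) p mfi (-1) false hp (by simp)
      | some k =>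
        have hkmem : k ∈ pvOcc s (L.drop p) 0 := List.mem_of_mem_head? hh
        have hkb := pvOcc_bounds s (L.drop p) 0 k hkmem
        have hkd : (L.drop p).length = L.length - p := List.length_drop
        have hk0 : 0 ≤ k := hkb.1
        have hklt : k < ((L.length : Int) - (p : Int)) := by
          have := hkb.2; push_cast [hkd] at this; omega
        have hm0 : pvAFind s (L.drop p) 0 = k := by rw [hfind, hh]; rfl
        have hfg : pvFirstGt ((p : Int) - 1) (pvOcc s L 0) = some (k + (p : Int)) := by
          rw [hstep, hh]; rfl
        -- the new cursor position
        set q : Nat := p + k.toNat + 1 with hq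
        have hqk : (q : Int) = (p : Int) + k + 1 := by
          push_cast [hq]; omega
        have hqle : q ≤ L.length := by omega
        have hslice : PySem.List.slice (L.drop p) (some (k + 1)) none = L.drop q := by
          rw [PySem.List.slice_from _ (by omega), List.drop_drop]
          congr 1
          omega
        simp only [pvALoop, pvBLoop, if_neg hbreak, if_neg hbB, hpos, hfg, hslice, hm0]
        have hkm1 : k ≠ -1 := by omega
        have hmfieq : (if k ≠ -1 ∧ (k = 0 ∨ s_i = 0) then true else mfi)
            = (if k + (p : Int) = (p : Int) - 1 + 1 ∨ s_i = 0 then true else mfi) := by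
          by_cases h0 : k = 0
          · have h1 : k + (p : Int) = (p : Int) - 1 + 1 := by omega
            simp [h0]
          · by_cases hs : s_i = 0
            · simp [h0, hs, hkm1]
            · have h1' : k + (p : Int) ≠ (p : Int) := by omega
              simp [h0, hs, h1']
        rw [hmfieq]
        have hrec := ih (s_i + 1) q (if k + (p : Int) = (p : Int) - 1 + 1 ∨ s_i = 0 then true else mfi) k true hqle (by simp; omega)
        have hqc : k + (p : Int) = (q : Int) - 1 := by omega
        rw [← hqc] at hrec
        exact hrec

theorem pvCore (S L : List Int) :
    (let r := pvALoop S 0 L (-1) false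
     if r.2.1 = -1 then false
     else if !r.2.2 && decide (r.1.length > 0) then false
     else true)
    = (let pos := pvBuildPos L 0 PySem.Dict.empty
       let last : Int := (L.length : Int) - 1
       let r := pvBLoop pos last S 0 (-1) false false
       r.2.2 && (r.2.1 || decide (r.1 = last))) := by
  obtain ⟨p', hp', hA1, hB1, hmfi, hf⟩ :=
    pvLoop_agree L S 0 0 false (-1) false (Nat.zero_le _) (by simp)
  rw [List.drop_zero] at hA1 hmfi hf
  norm_num at hB1 hmfi hf
  simp only []
  by_cases hm : (pvALoop S 0 L (-1) false).2.1 = -1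
  · have hfb : (pvBLoop (pvBuildPos L 0 PySem.Dict.empty) ((L.length : Int) - 1) S 0 (-1) false false).2.2 = false := by
      rw [hf]; simp [hm]
    simp [hm, hfb]
  · have hfb : (pvBLoop (pvBuildPos L 0 PySem.Dict.empty) ((L.length : Int) - 1) S 0 (-1) false false).2.2 = true := by
      rw [hf]; simp [hm]
    rw [if_neg hm, hfb, Bool.true_and, ← hmfi, hA1, hB1]
    cases hmf : (pvALoop S 0 L (-1) false).2.2
    · have hlen : (L.drop p').length = L.length - p' := List.length_drop
      by_cases hpe : p' = L.length
      · have h1 : (L.drop p').length = 0 := by omega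
        have h2 : ((p' : Int) - 1 = (L.length : Int) - 1) := by rw [hpe]
        simp [h1, h2]
      · have h1 : 0 < (L.drop p').length := by omega
        have h2 : ¬ ((p' : Int) - 1 = (L.length : Int) - 1) := by
          intro h; apply hpe; omega
        simp [h2]
        omega
    · simp

-- ===== VERDICT (by name: the statement is the Claim_ definition above) =====
theorem exist_ordered_overlap_py_spec : Claim_equal_exist_ordered_overlap_py := by
  intro ls ll _ _
  unfold Spec_exist_ordered_overlap_py
  by_cases h : ls.length > ll.length
  · rw [exist_ordered_overlap_py, dif_pos h, exist_ordered_overlap_py, dif_neg (by omega)]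
    unfold exist_ordered_overlap_py_alt
    rw [if_pos h]
    exact pvCore ll ls
  · rw [exist_ordered_overlap_py, dif_neg h]
    unfold exist_ordered_overlap_py_alt
    rw [if_neg h]
    exact pvCore ls ll
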